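-- pv_equiv track=rewrite | github.com/camrdale/advent-of-code | year2019/day22/part2.py | geometric_series
-- ===== SOURCE A (Python) =====
-- import math
--
-- def geometric_series(a: int, n : int, m : int) -> int:
--     """Sum of geometric series modulo m, using repeated squaring.
--
--     The geometric series is: 1 + a + a^2 + ... + a^n
--     """
--     sum = 0
--     factor = 1
--     while n > 0 and a != 0:
--         if n % 2 == 0:
--             temp = (factor * pow(a, n, m)) % m
--             sum = (sum + temp) % m
--             n -= 1
--         factor = (((1 + a) % m) * factor) % m
--         a = (a*a) % m
--         n = math.floor(n / 2)
--     return (sum + factor) % m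
-- ===== SOURCE B (Python) =====
-- def geometric_series(a: int, n: int, m: int) -> int:
--     """Sum of geometric series 1 + a + ... + a^n modulo m,
--     by divide-and-conquer recursion on n instead of an iterative bit loop."""
--     if n <= 0 or a == 0:
--         return 1 % m
--     g, _ = _sum_and_power(a, n, m)
--     return g
--
--
-- def _sum_and_power(a: int, n: int, m: int):
--     # returns ((1 + a + ... + a^n) % m, a^(n+1) % m) for n >= 0
--     if n <= 0:
--         return 1 % m, a % m
--     if n % 2 == 1:
--         g, q = _sum_and_power(a, (n - 1) // 2, m)
--         return (g * (1 + q)) % m, (q * q) % m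
--     g, q = _sum_and_power(a, n - 1, m)
--     return (g + q) % m, (q * a) % m
-- ===== Notes on version B (the rewrite author's own statement) =====
-- stated objective: faster
-- what changed: Replaced A's iterative bit-processing loop, which calls pow(a, n, m) (itself O(log n)) on every even step, by a single divide-and-conquer recursion on n whose helper returns both the partial geometric sum mod m and the running modular power, so no inner modular exponentiation is needed.
-- outside the precondition, e.g. on geometric_series(3, 5, 0): A raises ZeroDivisionError, B raises ZeroDivisionError
import Mathlib
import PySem

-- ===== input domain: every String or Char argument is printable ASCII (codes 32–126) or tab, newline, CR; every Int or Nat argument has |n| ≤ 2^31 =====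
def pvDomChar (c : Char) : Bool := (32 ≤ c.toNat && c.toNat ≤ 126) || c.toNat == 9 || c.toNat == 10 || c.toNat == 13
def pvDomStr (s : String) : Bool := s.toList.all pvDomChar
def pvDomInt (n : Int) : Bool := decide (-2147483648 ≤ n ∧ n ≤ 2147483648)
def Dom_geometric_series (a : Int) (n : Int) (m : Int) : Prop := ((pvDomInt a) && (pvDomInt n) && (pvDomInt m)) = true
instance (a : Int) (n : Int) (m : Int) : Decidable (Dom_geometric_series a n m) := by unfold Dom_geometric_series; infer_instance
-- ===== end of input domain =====

-- B replaces A's iterative bit-processing loop (which calls pow(a, n, m) inside the loop)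
-- by a single divide-and-conquer recursion on n returning (partial sum, modular power).

-- ===== PORT A =====
-- Python's built-in pow(b, e, m) for e ≥ 0: binary exponentiation, exactly what CPython executes;
-- it equals PySem.Int.powMod b e m (proved below in pvPowMod_eq) but evaluates in O(log e).
def pvPowMod (b : Int) (e : Nat) (m : Int) : Int :=
  if e = 0 then PySem.Int.mod 1 m
  else
    let r := pvPowMod (PySem.Int.mod (b * b) m) (e / 2) m
    if e % 2 = 0 then r else PySem.Int.mod (r * b) m
termination_by e
decreasing_by omega

-- A's while loop, step for step.  pow(a, n, m) with n > 0 is pvPowMod a n.toNat m (exact: n > 0 in the loop);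
-- math.floor(n / 2) equals floor division by 2, exact here since |n| ≤ 2^31 < 2^53.
def pvLoopA (a : Int) (n : Int) (m : Int) (sum : Int) (factor : Int) : Int :=
  if n > 0 ∧ a ≠ 0 then
    if PySem.Int.mod n 2 = 0 then
      -- temp = (factor * pow(a, n, m)) % m; sum = (sum + temp) % m; n -= 1
      pvLoopA (PySem.Int.mod (a * a) m) (PySem.Int.floordiv (n - 1) 2) m
        (PySem.Int.mod (sum + PySem.Int.mod (factor * pvPowMod a n.toNat m) m) m)
        (PySem.Int.mod (PySem.Int.mod (1 + a) m * factor) m)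
    else
      pvLoopA (PySem.Int.mod (a * a) m) (PySem.Int.floordiv n 2) m sum
        (PySem.Int.mod (PySem.Int.mod (1 + a) m * factor) m)
  else
    PySem.Int.mod (sum + factor) m
termination_by n.toNat
decreasing_by
  · rw [PySem.Int.floordiv_eq_ediv_of_pos (by omega : (0:Int) < 2)]; omega
  · rw [PySem.Int.floordiv_eq_ediv_of_pos (by omega : (0:Int) < 2)]; omega

def geometric_series (a : Int) (n : Int) (m : Int) : Int :=
  pvLoopA a n m 0 1

-- ===== PORT B =====
-- _sum_and_power(a, n, m): returns ((1 + a + ... + a^n) % m, a^(n+1) % m)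
def pvSumPow (a : Int) (n : Int) (m : Int) : Int × Int :=
  if n ≤ 0 then
    (PySem.Int.mod 1 m, PySem.Int.mod a m)
  else if PySem.Int.mod n 2 = 1 then
    let gq := pvSumPow a (PySem.Int.floordiv (n - 1) 2) m
    (PySem.Int.mod (gq.1 * (1 + gq.2)) m, PySem.Int.mod (gq.2 * gq.2) m)
  else
    let gq := pvSumPow a (n - 1) m
    (PySem.Int.mod (gq.1 + gq.2) m, PySem.Int.mod (gq.2 * a) m)
termination_by n.toNat
decreasing_by
  · rw [PySem.Int.floordiv_eq_ediv_of_pos (by omega : (0:Int) < 2)]; omega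
  · omega

def geometric_series_alt (a : Int) (n : Int) (m : Int) : Int :=
  if n ≤ 0 ∨ a = 0 then PySem.Int.mod 1 m
  else (pvSumPow a n m).1

-- ===== PRECONDITION & SPEC =====
-- Pre_ excludes exactly m = 0, on which the Python A raises ZeroDivisionError.
def Pre_geometric_series (a : Int) (n : Int) (m : Int) : Prop := m ≠ 0
instance (a : Int) (n : Int) (m : Int) : Decidable (Pre_geometric_series a n m) := by
  unfold Pre_geometric_series; infer_instance

def pvWitness_geometric_series : Int × Int × Int := (3, 5, 7)

def Spec_geometric_series (a : Int) (n : Int) (m : Int) (out : Int) : Prop := out = geometric_series_alt a n m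
instance (a : Int) (n : Int) (m : Int) (out : Int) : Decidable (Spec_geometric_series a n m out) := by unfold Spec_geometric_series; infer_instance

-- ===== CLAIM (what is proved, stated in full; the proofs are below) =====
def Claim_equal_geometric_series : Prop := ∀ (a : Int) (n : Int) (m : Int), Dom_geometric_series a n m → Pre_geometric_series a n m → Spec_geometric_series a n m (geometric_series a n m)

-- ===== LEMMAS AND PROOFS =====

-- The exact geometric sum 1 + a + ... + a^k.
def pvG (a : Int) : Nat → Int
  | 0 => 1
  | k + 1 => pvG a k + a ^ (k + 1)

theorem pvG_succ (b : Int) (k : Nat) : pvG b (k + 1) = pvG b k + b ^ (k + 1) := rfl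

theorem pymod_modEq (m x : Int) : Int.ModEq m (PySem.Int.mod x m) x := by
  have h := Int.fmod_add_mul_fdiv x m
  unfold PySem.Int.mod
  exact (Int.modEq_iff_dvd.mpr ⟨-(x.fdiv m), by linarith⟩).symm

theorem pymod_congr {m x y : Int} (h : Int.ModEq m x y) :
    PySem.Int.mod x m = PySem.Int.mod y m := by
  obtain ⟨k, hk⟩ := h.dvd
  have hy : y = x + m * k := by linarith
  unfold PySem.Int.mod
  rw [hy, Int.add_mul_fmod_self_left]

-- pvPowMod is Python's pow(b, e, m): equal to the prelude's powMod.
theorem pvPowMod_eq (m : Int) : ∀ (e : Nat) (b : Int), pvPowMod b e m = PySem.Int.powMod b e m := by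
  intro e
  induction e using Nat.strong_induction_on with
  | _ e ih =>
    intro b
    rw [pvPowMod]
    by_cases h0 : e = 0
    · rw [if_pos h0, h0]
      simp [PySem.Int.powMod]
    · rw [if_neg h0, ih (e / 2) (by omega) (PySem.Int.mod (b * b) m)]
      unfold PySem.Int.powMod
      have hhalf : PySem.Int.mod (PySem.Int.mod (b * b) m ^ (e / 2)) m
          = PySem.Int.mod ((b * b) ^ (e / 2)) m :=
        pymod_congr ((pymod_modEq m (b * b)).pow _)
      by_cases he : e % 2 = 0
      · rw [if_pos he, hhalf]
        have hb : (b * b) ^ (e / 2) = b ^ e := by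
          rw [show b * b = b ^ 2 by ring, ← pow_mul]
          congr 1; omega
        rw [hb]
      · rw [if_neg he, hhalf]
        apply pymod_congr
        calc PySem.Int.mod ((b * b) ^ (e / 2)) m * b
            ≡ (b * b) ^ (e / 2) * b [ZMOD m] := Int.ModEq.mul_right b (pymod_modEq m _)
          _ = b ^ e := by
              rw [show b * b = b ^ 2 by ring, ← pow_mul, ← pow_succ]
              congr 1; omega

theorem pvG_modEq {m x y : Int} (h : Int.ModEq m x y) (k : Nat) :
    Int.ModEq m (pvG x k) (pvG y k) := by
  induction k with
  | zero => rfl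
  | succ k ih => exact Int.ModEq.add ih (h.pow _)

theorem pvG_zero (k : Nat) : pvG 0 k = 1 := by
  induction k with
  | zero => rfl
  | succ k ih => simp [pvG_succ, ih]

theorem pvG_geom (a : Int) (j : Nat) : (a - 1) * pvG a j = a ^ (j + 1) - 1 := by
  induction j with
  | zero => simp [pvG]
  | succ j ih =>
    rw [pvG_succ, pow_succ a (j + 1)]
    linear_combination ih

theorem pvG_odd (a : Int) (j : Nat) :
    pvG a (2 * j + 1) = (1 + a) * pvG (a * a) j := by
  induction j with
  | zero => simp [pvG]
  | succ j ih =>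
    rw [show 2 * (j + 1) + 1 = (2 * j + 1) + 1 + 1 by ring,
        pvG_succ a ((2 * j + 1) + 1), pvG_succ a (2 * j + 1), ih, pvG_succ (a * a) j]
    have e1 : a ^ ((2 * j + 1) + 1) = (a * a) ^ (j + 1) := by
      rw [mul_pow, ← pow_add]; congr 1; ring
    have e2 : a ^ ((2 * j + 1) + 1 + 1) = (a * a) ^ (j + 1) * a := by
      rw [mul_pow, ← pow_add, ← pow_succ]; congr 1; ring
    rw [e1, e2]; ring

theorem pvG_even (a : Int) (j : Nat) :
    pvG a (2 * (j + 1)) = (1 + a) * pvG (a * a) j + a ^ (2 * (j + 1)) := by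
  rw [show 2 * (j + 1) = (2 * j + 1) + 1 by ring, pvG_succ, pvG_odd]

theorem pvG_split (a : Int) (j : Nat) :
    pvG a (2 * j + 1) = pvG a j * (1 + a ^ (j + 1)) := by
  induction j with
  | zero => simp [pvG]
  | succ j ih =>
    rw [show 2 * (j + 1) + 1 = (2 * j + 1) + 1 + 1 by ring,
        pvG_succ a ((2 * j + 1) + 1), pvG_succ a (2 * j + 1), ih, pvG_succ a j]
    have e1 : a ^ ((2 * j + 1) + 1) = a ^ (j + 1) * a ^ (j + 1) := by
      rw [← pow_add]; congr 1; ring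
    have e2 : a ^ ((2 * j + 1) + 1 + 1) = a ^ (j + 1) * a ^ (j + 1) * a := by
      rw [← pow_add, ← pow_succ]; congr 1; ring
    have e3 : a ^ (j + 1 + 1) = a ^ (j + 1) * a := pow_succ a (j + 1)
    rw [e1, e2, e3]
    linear_combination (-(a ^ (j + 1))) * pvG_geom a j

-- A's loop computes (sum + factor * (1 + a + ... + a^n)) % m.
theorem pvLoopA_eq (m : Int) : ∀ (k : Nat) (n a sum factor : Int), n.toNat = k →
    pvLoopA a n m sum factor = PySem.Int.mod (sum + factor * pvG a n.toNat) m := by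
  intro k
  induction k using Nat.strong_induction_on with
  | _ k ih =>
    intro n a sum factor hk
    rw [pvLoopA]
    by_cases hcond : n > 0 ∧ a ≠ 0
    · rw [if_pos hcond]
      obtain ⟨hn, -⟩ := hcond
      rw [PySem.Int.mod_eq_emod_of_pos (by omega : (0:Int) < 2)]
      by_cases he : n % 2 = 0
      · -- even branch
        rw [if_pos he,
            PySem.Int.floordiv_eq_ediv_of_pos (by omega : (0:Int) < 2)]
        set n' : Int := (n - 1) / 2 with hn'
        have hj : n'.toNat < k := by omega
        rw [ih n'.toNat hj n' _ _ _ rfl]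
        have hnt : n.toNat = 2 * (n'.toNat + 1) := by omega
        apply pymod_congr
        calc PySem.Int.mod (sum + PySem.Int.mod (factor * pvPowMod a n.toNat m) m) m +
              PySem.Int.mod (PySem.Int.mod (1 + a) m * factor) m * pvG (PySem.Int.mod (a * a) m) n'.toNat
            ≡ (sum + factor * a ^ n.toNat) + ((1 + a) * factor) * pvG (a * a) n'.toNat [ZMOD m] := by
              refine Int.ModEq.add ?_ (Int.ModEq.mul ?_ ?_)
              · exact (pymod_modEq m _).trans
                  (Int.ModEq.add_left sum ((pymod_modEq m _).trans
                    (Int.ModEq.mul_left factor (by rw [pvPowMod_eq]; exact pymod_modEq m _))))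
              · exact (pymod_modEq m _).trans (Int.ModEq.mul_right factor (pymod_modEq m _))
              · exact pvG_modEq (pymod_modEq m (a * a)) _
          _ = sum + factor * pvG a n.toNat := by
              rw [hnt, pvG_even]; ring
      · -- odd branch
        rw [if_neg he, PySem.Int.floordiv_eq_ediv_of_pos (by omega : (0:Int) < 2)]
        set n' : Int := n / 2 with hn'
        have hj : n'.toNat < k := by omega
        rw [ih n'.toNat hj n' _ _ _ rfl]
        have hnt : n.toNat = 2 * n'.toNat + 1 := by omega
        apply pymod_congr
        calc sum + PySem.Int.mod (PySem.Int.mod (1 + a) m * factor) m * pvG (PySem.Int.mod (a * a) m) n'.toNat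
            ≡ sum + ((1 + a) * factor) * pvG (a * a) n'.toNat [ZMOD m] :=
              Int.ModEq.add_left sum (Int.ModEq.mul
                ((pymod_modEq m _).trans (Int.ModEq.mul_right factor (pymod_modEq m _)))
                (pvG_modEq (pymod_modEq m (a * a)) _))
          _ = sum + factor * pvG a n.toNat := by rw [hnt, pvG_odd]; ring
    · rw [if_neg hcond]
      rcases not_and_or.mp hcond with hn | ha
      · have : n.toNat = 0 := by omega
        rw [this]; simp [pvG]
      · have ha0 : a = 0 := by simpa using ha
        rw [ha0, pvG_zero]; ring_nf

-- B's helper returns ((1 + a + ... + a^n) % m, a^(n+1) % m).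
theorem pvSumPow_eq (m : Int) : ∀ (k : Nat) (n a : Int), n.toNat = k →
    pvSumPow a n m = (PySem.Int.mod (pvG a n.toNat) m, PySem.Int.mod (a ^ (n.toNat + 1)) m) := by
  intro k
  induction k using Nat.strong_induction_on with
  | _ k ih =>
    intro n a hk
    rw [pvSumPow]
    by_cases hle : n ≤ 0
    · rw [if_pos hle]
      have : n.toNat = 0 := by omega
      rw [this]; simp [pvG]
    · rw [if_neg hle]
      rw [PySem.Int.mod_eq_emod_of_pos (by omega : (0:Int) < 2)]
      by_cases ho : n % 2 = 1
      · rw [if_pos ho, PySem.Int.floordiv_eq_ediv_of_pos (by omega : (0:Int) < 2)]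
        set n' : Int := (n - 1) / 2 with hn'
        have hj : n'.toNat < k := by omega
        rw [ih n'.toNat hj n' a rfl]
        have hnt : n.toNat = 2 * n'.toNat + 1 := by omega
        refine Prod.ext ?_ ?_ <;> simp only
        · apply pymod_congr
          calc PySem.Int.mod (pvG a n'.toNat) m * (1 + PySem.Int.mod (a ^ (n'.toNat + 1)) m)
              ≡ pvG a n'.toNat * (1 + a ^ (n'.toNat + 1)) [ZMOD m] :=
                Int.ModEq.mul (pymod_modEq m _) (Int.ModEq.add_left 1 (pymod_modEq m _))
            _ = pvG a n.toNat := by rw [hnt, pvG_split]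
        · apply pymod_congr
          calc PySem.Int.mod (a ^ (n'.toNat + 1)) m * PySem.Int.mod (a ^ (n'.toNat + 1)) m
              ≡ a ^ (n'.toNat + 1) * a ^ (n'.toNat + 1) [ZMOD m] :=
                Int.ModEq.mul (pymod_modEq m _) (pymod_modEq m _)
            _ = a ^ (n.toNat + 1) := by rw [← pow_add, hnt]; congr 1; ring
      · rw [if_neg ho]
        have hj : (n - 1).toNat < k := by omega
        rw [ih (n - 1).toNat hj (n - 1) a rfl]
        have hnt : n.toNat = (n - 1).toNat + 1 := by omega
        refine Prod.ext ?_ ?_ <;> simp only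
        · apply pymod_congr
          calc PySem.Int.mod (pvG a (n - 1).toNat) m + PySem.Int.mod (a ^ ((n - 1).toNat + 1)) m
              ≡ pvG a (n - 1).toNat + a ^ ((n - 1).toNat + 1) [ZMOD m] :=
                Int.ModEq.add (pymod_modEq m _) (pymod_modEq m _)
            _ = pvG a n.toNat := by rw [hnt, pvG_succ]
        · apply pymod_congr
          calc PySem.Int.mod (a ^ ((n - 1).toNat + 1)) m * a
              ≡ a ^ ((n - 1).toNat + 1) * a [ZMOD m] :=
                Int.ModEq.mul_right a (pymod_modEq m _)
            _ = a ^ (n.toNat + 1) := by rw [← pow_succ, hnt]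

-- ===== VERDICT (by name: the statement is the Claim_ definition above) =====
theorem geometric_series_spec : Claim_equal_geometric_series := by
  intro a n m _ _
  unfold Spec_geometric_series geometric_series geometric_series_alt
  rw [pvLoopA_eq m n.toNat n a 0 1 rfl]
  by_cases h : n ≤ 0 ∨ a = 0
  · rw [if_pos h]
    rcases h with hn | ha
    · have : n.toNat = 0 := by omega
      rw [this]; simp [pvG]
    · rw [ha, pvG_zero]; ring_nf
  · rw [if_neg h]
    rw [pvSumPow_eq m n.toNat n a rfl]
    simp only
    ring_nf
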